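-- pv_equiv track=rewrite | github.com/Propolisss/home_code-python- | consultations/big_variant/23/6.py | f
-- ===== SOURCE A (Python) =====
-- def f(start, end, flag):
--     if '5' in str(start):
--         flag = 0
--     if start > end:
--         return 0
--     elif start == end:
--         return flag
--     else:
--         return f(start + 1, end, flag) + f(start * 2, end, flag)
-- ===== SOURCE B (Python) =====
-- def f(start, end, flag):
--     # Bottom-up DP over the reachable values instead of A's exponential recursion.
--     ways = {}
--     for v in reversed(range(start, end + 1)):
--         if '5' in str(v):
--             ways[v] = 0
--         elif v == end:
--             ways[v] = 1
--         else:
--             ways[v] = ways[v + 1] + ways.get(2 * v, 0)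
--     return flag * ways.get(start, 0)
-- ===== Notes on version B (the rewrite author's own statement) =====
-- stated objective: faster
-- what changed: Replaces A's exponential two-way recursion by a single bottom-up dynamic-programming pass that tabulates, for each value v from end down to start, the number of '5'-free +1/*2 paths from v to end, returning flag times the table entry at start.
import Mathlib
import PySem

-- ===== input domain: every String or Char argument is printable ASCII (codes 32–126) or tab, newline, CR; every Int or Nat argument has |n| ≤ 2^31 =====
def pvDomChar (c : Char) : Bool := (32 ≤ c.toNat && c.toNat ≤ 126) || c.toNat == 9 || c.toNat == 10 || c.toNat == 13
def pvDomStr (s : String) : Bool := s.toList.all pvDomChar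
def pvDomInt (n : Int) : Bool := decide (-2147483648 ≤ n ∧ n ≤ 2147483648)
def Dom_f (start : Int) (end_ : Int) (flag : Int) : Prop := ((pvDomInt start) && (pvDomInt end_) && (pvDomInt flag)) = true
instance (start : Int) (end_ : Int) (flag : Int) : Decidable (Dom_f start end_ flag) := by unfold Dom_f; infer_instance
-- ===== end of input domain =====

-- B replaces A's exponential recursion by a linear bottom-up DP table (faster, asymptotic).

-- '5' in str(n)
def pvHas5 (n : Int) : Bool := PySem.Str.isIn "5" (PySem.Int.toStr n)

-- ===== PORT A =====
-- fuel-guarded transliteration of A's recursion; the fuel (end_ - start).toNat + 1 bounds the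
-- recursion depth (each call strictly increases start by ≥ 1 on inputs satisfying Pre_f)
def fA : Nat → Int → Int → Int → Int
  | 0, _, _, _ => 0
  | Nat.succ n, start, end_, flag =>
    let flag := if pvHas5 start then 0 else flag
    if start > end_ then 0
    else if start = end_ then flag
    else fA n (start + 1) end_ flag + fA n (start * 2) end_ flag

def f (start : Int) (end_ : Int) (flag : Int) : Int :=
  fA ((end_ - start).toNat + 1) start end_ flag

-- ===== PORT B =====
def f_alt (start : Int) (end_ : Int) (flag : Int) : Int :=
  let ways := (PySem.List.pyRange start (end_ + 1) 1).reverse.foldl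
    (fun d v =>
      if pvHas5 v then d.insert v 0
      else if v = end_ then d.insert v 1
      else d.insert v (d.getD (v + 1) 0 + d.getD (2 * v) 0))
    (PySem.Dict.empty)
  flag * ways.getD start 0

-- ===== PRECONDITION & SPEC =====
-- Pre_f excludes exactly the inputs (start < end and start ≤ 0) on which A recurses forever
-- through the +1/*2 cycle among non-positive values and raises RecursionError.
def Pre_f (start : Int) (end_ : Int) (flag : Int) : Prop := 1 ≤ start ∨ end_ ≤ start
instance (start : Int) (end_ : Int) (flag : Int) : Decidable (Pre_f start end_ flag) := by
  unfold Pre_f; infer_instance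

def pvWitness_f : Int × Int × Int := (1, 3, 2)

def Spec_f (start : Int) (end_ : Int) (flag : Int) (out : Int) : Prop := out = f_alt start end_ flag
instance (start : Int) (end_ : Int) (flag : Int) (out : Int) : Decidable (Spec_f start end_ flag out) := by
  unfold Spec_f; infer_instance

-- ===== CLAIM (what is proved, stated in full; the proofs are below) =====
def Claim_equal_f : Prop := ∀ (start : Int) (end_ : Int) (flag : Int), Dom_f start end_ flag → Pre_f start end_ flag → Spec_f start end_ flag (f start end_ flag)

-- ===== LEMMAS AND PROOFS =====

-- number of '5'-free +1/*2 paths from v to e, fuel-guarded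
def Ng : Nat → Int → Int → Int
  | 0, _, _ => 0
  | Nat.succ n, v, e =>
    if e < v then 0
    else if pvHas5 v then 0
    else if v = e then 1
    else Ng n (v + 1) e + Ng n (2 * v) e

theorem fA_eq_mul_Ng (n : Nat) : ∀ (s e fl : Int), fA n s e fl = fl * Ng n s e := by
  induction n with
  | zero => intro s e fl; simp [fA, Ng]
  | succ n ih =>
    intro s e fl
    simp only [fA, Ng]
    by_cases h5 : pvHas5 s = true
    · simp only [h5, if_true]
      split_ifs with h1 h2
      · simp
      · simp
      · simp [ih]
    · simp only [h5, if_false, Bool.false_eq_true]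
      split_ifs with h1 h2
      · simp
      · simp
      · rw [ih, ih, Int.mul_comm s 2, mul_add]

-- fuel irrelevance above the gap, for 1 ≤ v
theorem Ng_fuel_mono (k : Nat) : ∀ (v e : Int) (n m : Nat), 1 ≤ v → (e - v).toNat ≤ k →
    k < n → k < m → Ng n v e = Ng m v e := by
  induction k with
  | zero =>
    intro v e n m hv hk hn hm
    obtain ⟨n', rfl⟩ := Nat.exists_eq_succ_of_ne_zero (by omega : n ≠ 0)
    obtain ⟨m', rfl⟩ := Nat.exists_eq_succ_of_ne_zero (by omega : m ≠ 0)
    have hev : e ≤ v := by omega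
    simp only [Ng]
    split_ifs with h1 h2 h3 <;> first | rfl | omega
  | succ k ih =>
    intro v e n m hv hk hn hm
    obtain ⟨n', rfl⟩ := Nat.exists_eq_succ_of_ne_zero (by omega : n ≠ 0)
    obtain ⟨m', rfl⟩ := Nat.exists_eq_succ_of_ne_zero (by omega : m ≠ 0)
    simp only [Ng]
    split_ifs with h1 h2 h3
    · rfl
    · rfl
    · rfl
    · have hlt : v < e := by omega
      rw [ih (v + 1) e n' m' (by omega) (by omega) (by omega) (by omega),
          ih (2 * v) e n' m' (by omega) (by omega) (by omega) (by omega)]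

-- the DP loop of f_alt, named for the proofs
def pvLoop (s e : Int) : PySem.Dict Int Int :=
  (PySem.List.pyRange s (e + 1) 1).reverse.foldl
    (fun d v =>
      if pvHas5 v then d.insert v 0
      else if v = e then d.insert v 1
      else d.insert v (d.getD (v + 1) 0 + d.getD (2 * v) 0))
    (PySem.Dict.empty)

theorem f_alt_eq_loop (s e fl : Int) : f_alt s e fl = fl * (pvLoop s e).getD s 0 := rfl

theorem pvLoop_empty (s e : Int) (h : e < s) : pvLoop s e = PySem.Dict.empty := by
  unfold pvLoop
  rw [PySem.List.pyRange_one_eq_nil (by omega)]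
  rfl

theorem pvLoop_step (s e : Int) (h : s ≤ e) :
    pvLoop s e =
      (fun d v =>
        if pvHas5 v then d.insert v 0
        else if v = e then d.insert v 1
        else d.insert v (d.getD (v + 1) 0 + d.getD (2 * v) 0)) (pvLoop (s + 1) e) s := by
  unfold pvLoop
  rw [PySem.List.pyRange_one_cons (by omega : s < e + 1)]
  rw [List.reverse_cons, List.foldl_append]
  rfl

-- loop invariant: for 1 ≤ s ≤ e the table holds Ng on [s, e] and nothing else
theorem pvLoop_invariant (g : Nat) : ∀ (s e : Int), 1 ≤ s → s ≤ e → (e - s).toNat = g →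
    (∀ u, s ≤ u → u ≤ e → (pvLoop s e).getD u 0 = Ng ((e - u).toNat + 1) u e) ∧
    (∀ u, u < s ∨ e < u → (pvLoop s e).get? u = none) := by
  induction g with
  | zero =>
    intro s e hs hse hg
    have hse' : s = e := by omega
    subst hse'
    rw [pvLoop_step s s le_rfl, pvLoop_empty (s + 1) s (by omega)]
    constructor
    · intro u hu1 hu2
      have : u = s := le_antisymm hu2 hu1
      subst this
      by_cases h5 : pvHas5 u = true
      · simp [h5, PySem.Dict.getD_insert_self, Ng]
      · simp [h5, PySem.Dict.getD_insert_self, Ng]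
    · intro u hu
      have hne : u ≠ s := by omega
      by_cases h5 : pvHas5 s = true
      · simp only [h5, if_true]
        rw [PySem.Dict.get?_insert_of_ne _ _ hne]
        exact PySem.Dict.get?_empty u
      · simp only [h5, if_false, Bool.false_eq_true, if_true]
        rw [PySem.Dict.get?_insert_of_ne _ _ hne]
        exact PySem.Dict.get?_empty u
  | succ g ih =>
    intro s e hs hse hg
    have hlt : s < e := by omega
    obtain ⟨IH1, IH2⟩ := ih (s + 1) e (by omega) (by omega) (by omega)
    rw [pvLoop_step s e (by omega)]
    simp only
    -- value stored at s
    have hval :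
        (if pvHas5 s then (pvLoop (s + 1) e).insert s 0
         else if s = e then (pvLoop (s + 1) e).insert s 1
         else (pvLoop (s + 1) e).insert s
            ((pvLoop (s + 1) e).getD (s + 1) 0 + (pvLoop (s + 1) e).getD (2 * s) 0)).getD s 0
          = Ng ((e - s).toNat + 1) s e := by
      by_cases h5 : pvHas5 s = true
      · simp only [h5, if_true, PySem.Dict.getD_insert_self]
        have : Ng ((e - s).toNat + 1) s e = 0 := by
          obtain ⟨g', hg'⟩ : ∃ g', (e - s).toNat = g' + 1 := ⟨g, by omega⟩
          rw [hg']; simp [Ng, h5, show ¬ e < s by omega]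
        omega
      · have hne : s ≠ e := by omega
        simp only [h5, Bool.false_eq_true, if_false, hne, PySem.Dict.getD_insert_self]
        -- unfold Ng one step
        obtain ⟨g', hg'⟩ : ∃ g', (e - s).toNat = g' + 1 := ⟨g, by omega⟩
        have hNg : Ng ((e - s).toNat + 1) s e
            = Ng ((e - s).toNat) (s + 1) e + Ng ((e - s).toNat) (2 * s) e := by
          simp [Ng, h5, hne, show ¬ e < s by omega]
        rw [hNg]
        have h1 : (pvLoop (s + 1) e).getD (s + 1) 0 = Ng ((e - s).toNat) (s + 1) e := by
          rw [IH1 (s + 1) le_rfl (by omega)]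
          congr 1
          omega
        have h2 : (pvLoop (s + 1) e).getD (2 * s) 0 = Ng ((e - s).toNat) (2 * s) e := by
          by_cases h2e : 2 * s ≤ e
          · rw [IH1 (2 * s) (by omega) h2e]
            exact Ng_fuel_mono ((e - 2 * s).toNat) (2 * s) e _ _ (by omega) le_rfl
              (by omega) (by omega)
          · rw [PySem.Dict.getD_eq_get?_getD, IH2 (2 * s) (Or.inr (by omega))]
            obtain ⟨g'', hg''⟩ : ∃ g'', (e - s).toNat = g'' + 1 := ⟨g, by omega⟩
            rw [hg'']
            simp [Ng, show e < 2 * s by omega]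
        rw [h1, h2]
    constructor
    · intro u hu1 hu2
      rcases eq_or_lt_of_le hu1 with h | h
      · subst h; exact hval
      · have hne : u ≠ s := by omega
        by_cases h5 : pvHas5 s = true
        · simp only [h5, if_true]
          rw [PySem.Dict.getD_insert, if_neg hne]
          exact IH1 u (by omega) hu2
        · have hnes : s ≠ e := by omega
          simp only [h5, Bool.false_eq_true, if_false, hnes]
          rw [PySem.Dict.getD_insert, if_neg hne]
          exact IH1 u (by omega) hu2
    · intro u hu
      have hne : u ≠ s := by omega
      by_cases h5 : pvHas5 s = true
      · simp only [h5, if_true]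
        rw [PySem.Dict.get?_insert_of_ne _ _ hne]
        exact IH2 u (by omega)
      · have hnes : s ≠ e := by omega
        simp only [h5, Bool.false_eq_true, if_false, hnes]
        rw [PySem.Dict.get?_insert_of_ne _ _ hne]
        exact IH2 u (by omega)

-- ===== VERDICT (by name: the statement is the Claim_ definition above) =====
theorem f_spec : Claim_equal_f := by
  intro s e fl _hdom hpre
  unfold Spec_f
  rw [f_alt_eq_loop]
  unfold f
  rw [fA_eq_mul_Ng]
  congr 1
  rcases lt_trichotomy e s with h | h | h
  · -- start > end: empty table, Ng = 0
    rw [pvLoop_empty s e h]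
    rw [show (e - s).toNat = 0 by omega]
    simp [Ng, h, PySem.Dict.getD_empty]
  · -- start = end
    subst h
    rw [pvLoop_step e e le_rfl, pvLoop_empty (e + 1) e (by omega)]
    by_cases h5 : pvHas5 e = true
    · simp [h5, PySem.Dict.getD_insert_self, Ng]
    · simp [h5, PySem.Dict.getD_insert_self, Ng]
  · -- 1 ≤ start < end: the invariant
    have hs : 1 ≤ s := by
      rcases hpre with h1 | h1
      · exact h1
      · omega
    exact ((pvLoop_invariant ((e - s).toNat) s e hs (by omega) rfl).1 s le_rfl (by omega)).symm
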